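-- pv_equiv track=rewrite | github.com/alp-kudzai/AOC-day3 | day3.py | findLeastCommonBits
-- ===== SOURCE A (Python) =====
-- def findLeastCommonBits(input: list, count: list):
--     if input == []:
--         if count[1] >= count[0]:
--             return '0'
--         else:
--             return '1'
--     if input[0] == '0':
--         count[0] += 1
--     else:
--         count[1] += 1
--     return findLeastCommonBits(input[1:], count)
-- ===== SOURCE B (Python) =====
-- def findLeastCommonBits(input: list, count: list):
--     for bit in input:
--         if bit == '0':
--             count[0] += 1
--         else:
--             count[1] += 1
--     return '0' if count[1] >= count[0] else '1'
-- ===== Notes on version B (the rewrite author's own statement) =====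
-- stated objective: idiomatic
-- what changed: Replaced the O(n^2) slicing recursion (input[1:] copies the list at every step) with a single iterative for-loop over the input that mutates the same count list and returns after the loop.
import Mathlib
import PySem

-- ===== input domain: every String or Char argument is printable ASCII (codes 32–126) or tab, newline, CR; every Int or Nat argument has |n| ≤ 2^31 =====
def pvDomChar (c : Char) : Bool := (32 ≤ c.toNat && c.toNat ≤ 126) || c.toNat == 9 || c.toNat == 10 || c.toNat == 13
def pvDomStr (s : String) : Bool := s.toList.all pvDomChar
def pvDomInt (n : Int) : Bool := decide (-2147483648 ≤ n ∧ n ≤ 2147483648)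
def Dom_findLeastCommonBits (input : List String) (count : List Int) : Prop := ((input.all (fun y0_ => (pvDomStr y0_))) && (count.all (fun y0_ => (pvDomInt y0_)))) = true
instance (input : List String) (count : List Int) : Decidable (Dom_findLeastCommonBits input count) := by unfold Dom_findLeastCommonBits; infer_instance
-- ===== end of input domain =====

-- ===== PORT A =====
-- literal port of A: recursion on the list, mutating count via pySetD/pyGetD
-- (Python raises IndexError when count has fewer than 2 elements; Pre_ excludes that)
def findLeastCommonBits (input : List String) (count : List Int) : String :=
  match input with
  | [] =>
      if PySem.List.pyGetD count 1 0 ≥ PySem.List.pyGetD count 0 0 then "0" else "1"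
  | bit :: rest =>
      if bit == "0" then
        findLeastCommonBits rest (PySem.List.pySetD count 0 (PySem.List.pyGetD count 0 0 + 1))
      else
        findLeastCommonBits rest (PySem.List.pySetD count 1 (PySem.List.pyGetD count 1 0 + 1))

-- ===== PORT B =====
-- port of B: one iterative pass (foldl) updating count, then the comparison
def fLCBStep (c : List Int) (bit : String) : List Int :=
  if bit == "0" then PySem.List.pySetD c 0 (PySem.List.pyGetD c 0 0 + 1)
  else PySem.List.pySetD c 1 (PySem.List.pyGetD c 1 0 + 1)

def findLeastCommonBits_alt (input : List String) (count : List Int) : String :=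
  let c := input.foldl fLCBStep count
  if PySem.List.pyGetD c 1 0 ≥ PySem.List.pyGetD c 0 0 then "0" else "1"

-- ===== PRECONDITION & SPEC =====
-- Pre_ excludes count lists with fewer than two elements, on which both Pythons raise IndexError
def Pre_findLeastCommonBits (input : List String) (count : List Int) : Prop := 2 ≤ count.length
instance (input : List String) (count : List Int) : Decidable (Pre_findLeastCommonBits input count) := by unfold Pre_findLeastCommonBits; infer_instance
def pvWitness_findLeastCommonBits : List String × List Int := (["0", "1", "1"], [0, 0])

def Spec_findLeastCommonBits (input : List String) (count : List Int) (out : String) : Prop := out = findLeastCommonBits_alt input count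
instance (input : List String) (count : List Int) (out : String) : Decidable (Spec_findLeastCommonBits input count out) := by unfold Spec_findLeastCommonBits; infer_instance

-- ===== CLAIM (what is proved, stated in full; the proofs are below) =====
def Claim_equal_findLeastCommonBits : Prop := ∀ (input : List String) (count : List Int), Dom_findLeastCommonBits input count → Pre_findLeastCommonBits input count → Spec_findLeastCommonBits input count (findLeastCommonBits input count)

-- ===== LEMMAS AND PROOFS =====
theorem fLCB_eq_alt (input : List String) : ∀ (count : List Int),
    findLeastCommonBits input count = findLeastCommonBits_alt input count := by
  induction input with
  | nil => intro count; rfl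
  | cons bit rest ih =>
      intro count
      simp only [findLeastCommonBits, findLeastCommonBits_alt, List.foldl_cons, fLCBStep]
      split <;> exact ih _

-- ===== VERDICT (by name: the statement is the Claim_ definition above) =====
theorem findLeastCommonBits_spec : Claim_equal_findLeastCommonBits := by
  intro input count _ _
  exact fLCB_eq_alt input count
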